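-- pv_equiv track=rewrite | github.com/luckboy/espact | espact/filters.py | shsqe
-- ===== SOURCE A (Python) =====
-- def shsqe(string):
--     new_string = ""
--     for c in string:
--         if c == "'":
--             new_string += "'\\''"
--         else:
--             new_string += c
--     return new_string
-- ===== SOURCE B (Python) =====
-- def shsqe(string):
--     return "'\\''".join(string.split("'"))
-- ===== Notes on version B (the rewrite author's own statement) =====
-- stated objective: idiomatic
-- what changed: Replaces the per-character loop with its branch and repeated string concatenation by splitting the string into the fragments between single quotes and rejoining them with the escape sequence.
import Mathlib
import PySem

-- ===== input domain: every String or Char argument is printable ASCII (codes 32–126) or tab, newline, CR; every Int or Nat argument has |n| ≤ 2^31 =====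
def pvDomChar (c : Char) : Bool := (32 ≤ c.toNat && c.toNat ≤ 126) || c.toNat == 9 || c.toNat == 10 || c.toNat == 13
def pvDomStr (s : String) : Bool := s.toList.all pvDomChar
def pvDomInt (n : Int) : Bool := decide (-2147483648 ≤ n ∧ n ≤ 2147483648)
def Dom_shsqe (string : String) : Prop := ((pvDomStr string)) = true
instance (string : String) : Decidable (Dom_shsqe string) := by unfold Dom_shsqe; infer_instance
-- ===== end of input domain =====

-- B replaces A's per-character loop by split-on-quote + join with the escape sequence (idiomatic).

-- ===== PORT A =====
-- A: loop over the characters, appending either the escape sequence or the character.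
def shsqe (string : String) : String :=
  String.ofList (string.toList.foldl
    (fun new_string c =>
      if c == '\'' then new_string ++ ['\'', '\\', '\'', '\'']
      else new_string ++ [c]) [])

-- ===== PORT B =====
-- B: "'\\''".join(string.split("'")) — split and join ported with PySem.Chars.
def shsqe_alt (string : String) : String :=
  String.ofList (PySem.Chars.join ['\'', '\\', '\'', '\'']
    (PySem.Chars.splitOn string.toList ['\'']))

-- ===== PRECONDITION & SPEC =====
def Spec_shsqe (string : String) (out : String) : Prop := out = shsqe_alt string
instance (string : String) (out : String) : Decidable (Spec_shsqe string out) := by unfold Spec_shsqe; infer_instance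

-- ===== CLAIM (what is proved, stated in full; the proofs are below) =====
def Claim_equal_shsqe : Prop := ∀ (string : String), Dom_shsqe string → Spec_shsqe string (shsqe string)

-- ===== LEMMAS AND PROOFS =====

lemma modifyHead_fun_id {α : Type} (l : List α) : l.modifyHead (fun x => x) = l := by
  cases l <;> simp

-- splitOn.go on a one-char separator, with enough fuel, is List.splitOnP with the accumulators prepended.
lemma splitOn_go_single (q : Char) :
    ∀ (fuel : Nat) (l cur : List Char) (acc : List (List Char)), l.length < fuel →
      PySem.Chars.splitOn.go [q] fuel l cur acc
        = acc.reverse ++ (List.splitOnP (· == q) l).modifyHead (cur.reverse ++ ·) := by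
  intro fuel
  induction fuel with
  | zero => intro l cur acc h; omega
  | succ n ih =>
    intro l cur acc h
    cases l with
    | nil => simp [PySem.Chars.splitOn.go, List.splitOnP_nil]
    | cons c rest =>
      simp only [PySem.Chars.splitOn.go]
      by_cases hc : c = q
      · subst hc
        have hpre : [c].isPrefixOf (c :: rest) = true := by simp [List.isPrefixOf]
        rw [if_pos hpre]
        rw [ih _ _ _ (by simpa using Nat.lt_of_succ_lt_succ h)]
        simp [List.splitOnP_cons, modifyHead_fun_id]
      · have hpre : [q].isPrefixOf (c :: rest) = false := by
          simp [List.isPrefixOf]; exact fun hqc => (hc hqc.symm).elim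
        rw [if_neg (by simp [hpre])]
        rw [ih _ _ _ (by simpa using Nat.lt_of_succ_lt_succ h)]
        rcases hne : List.splitOnP (· == q) rest with _ | ⟨hd, tl⟩
        · exact absurd hne (List.splitOnP_ne_nil _ _)
        · simp [List.splitOnP_cons, hc, hne]

lemma splitOn_single (q : Char) (s : List Char) :
    PySem.Chars.splitOn s [q] = List.splitOnP (· == q) s := by
  unfold PySem.Chars.splitOn
  rw [splitOn_go_single q (s.length + 1) s [] [] (Nat.lt_succ_self _)]
  simp [modifyHead_fun_id]

-- A's fold, started from any accumulator, is that accumulator followed by join-of-split.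
lemma foldA (q : Char) (esc : List Char) :
    ∀ (s acc : List Char),
      s.foldl (fun ns c => if c == q then ns ++ esc else ns ++ [c]) acc
        = acc ++ PySem.Chars.join esc (List.splitOnP (· == q) s) := by
  intro s
  induction s with
  | nil => intro acc; simp [List.splitOnP_nil, PySem.Chars.join, List.intercalate]
  | cons c rest ih =>
    intro acc
    rcases hne : List.splitOnP (· == q) rest with _ | ⟨hd, tl⟩
    · exact absurd hne (List.splitOnP_ne_nil _ _)
    by_cases hc : c = q
    · simp only [List.foldl_cons, hc, beq_self_eq_true, if_pos]
      rw [ih]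
      simp [List.splitOnP_cons, hne, PySem.Chars.join, List.intercalate]
    · rw [List.foldl_cons, if_neg (by simp [hc]), ih]
      simp only [List.splitOnP_cons, beq_iff_eq, hc, hne, reduceIte,
        List.modifyHead_cons, PySem.Chars.join, List.intercalate]
      cases tl <;> simp [List.intersperse]

-- ===== VERDICT (by name: the statement is the Claim_ definition above) =====
theorem shsqe_spec : Claim_equal_shsqe := by
  intro string _
  unfold Spec_shsqe shsqe shsqe_alt
  rw [splitOn_single, foldA]
  simp
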